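-- pv_equiv track=rewrite | github.com/rnks2003/myFoobar | queueID.py | solution
-- ===== SOURCE A (Python) =====
-- def solution(start,length):
--     def rXor(start,end):
--         def Xor(end):
--             res=0
--             if end%4 == 0:
--                 res =end
--             elif end%4 == 1:
--                 res = 1
--             elif end%4 ==2:
--                 res = end+1
--             return res
--         return Xor(end)^Xor(start-1)
--
--     temp = start
--     res = 0
--     j = 0
--
--     for i in range(length,0,-1):
--         end = temp + i-1
--         res^=rXor(temp,end)
--         j+=1
--         temp = end+j
--     return res
-- ===== SOURCE B (Python) =====
-- def _xor_range(lo, hi):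
--     # XOR of all integers in [lo, hi] (lo <= hi): peel an odd lo / even hi so the
--     # middle is whole pairs (2k, 2k+1), each XORing to 1; only the pair-count
--     # parity matters.
--     res = 0
--     if lo % 2 == 1:
--         res ^= lo
--         lo += 1
--     if hi % 2 == 0:
--         res ^= hi
--         hi -= 1
--     if ((hi - lo + 1) // 2) % 2 == 1:
--         res ^= 1
--     return res
--
--
-- def solution(start, length):
--     # The rows together tile the contiguous span [start, start + length**2 - length]
--     # except for a gap of r integers just before row r (r = 1 .. length-2's successor);
--     # XOR the whole span once, then XOR the gaps back out (x ^ x = 0).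
--     if length <= 0:
--         return 0
--     res = _xor_range(start, start + length * length - length)
--     for r in range(1, length - 1):
--         lo = start + r * length + length - r
--         res ^= _xor_range(lo, lo + r - 1)
--     return res
-- ===== Notes on version B (the rewrite author's own statement) =====
-- stated objective: alternative
-- what changed: B never walks A's rows: it XORs the whole contiguous span [start, start+length^2-length] once and then XORs the inter-row gaps back out (set-complement via x^x=0), computing each range XOR by the odd/even-end pairing argument instead of A's temp/j row walk with the mod-4 prefix-XOR table.
import Mathlib
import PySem

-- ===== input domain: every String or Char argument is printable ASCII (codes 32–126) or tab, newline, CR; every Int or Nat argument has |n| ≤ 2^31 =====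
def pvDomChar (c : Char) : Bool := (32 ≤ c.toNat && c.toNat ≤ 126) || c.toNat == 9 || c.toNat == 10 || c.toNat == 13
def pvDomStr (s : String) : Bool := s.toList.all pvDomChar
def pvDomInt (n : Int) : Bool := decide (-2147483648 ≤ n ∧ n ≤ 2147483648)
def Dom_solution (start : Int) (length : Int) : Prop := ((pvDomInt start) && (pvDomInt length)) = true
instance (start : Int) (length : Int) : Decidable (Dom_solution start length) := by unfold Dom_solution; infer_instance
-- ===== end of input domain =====

-- B never walks A's rows: it XORs the whole contiguous span once and XORs the
-- inter-row gaps back out (x ^ x = 0), each range XORed by the odd/even-end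
-- pairing argument, with no temp/j walk and no mod-4 table (objective: alternative).

-- ===== PORT A =====
-- inner helper Xor(end): the %4 prefix-XOR table
def pvXorA (e : Int) : Int :=
  if PySem.Int.mod e 4 = 0 then e
  else if PySem.Int.mod e 4 = 1 then 1
  else if PySem.Int.mod e 4 = 2 then e + 1
  else 0

-- helper rXor(start, end) = Xor(end) ^ Xor(start-1)
def pvRXorA (s e : Int) : Int := PySem.Int.bxor (pvXorA e) (pvXorA (s - 1))

def solution (start : Int) (length : Int) : Int :=
  -- state (temp, res, j); for i in range(length, 0, -1)
  let st := (PySem.List.pyRange length 0 (-1)).foldl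
    (fun (st : Int × Int × Int) i =>
      let temp := st.1
      let res := st.2.1
      let j := st.2.2
      let e := temp + i - 1
      let res := PySem.Int.bxor res (pvRXorA temp e)
      let j := j + 1
      (e + j, res, j))
    (start, 0, 0)
  st.2.1

-- ===== PORT B =====
-- helper _xor_range(lo, hi): peel odd lo / even hi, then count pairs (2k, 2k+1)
def pvXorRangeB (lo hi : Int) : Int :=
  let res : Int := 0
  let p1 := if PySem.Int.mod lo 2 = 1 then (PySem.Int.bxor res lo, lo + 1) else (res, lo)
  let res := p1.1
  let lo := p1.2
  let p2 := if PySem.Int.mod hi 2 = 0 then (PySem.Int.bxor res hi, hi - 1) else (res, hi)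
  let res := p2.1
  let hi := p2.2
  if PySem.Int.mod (PySem.Int.floordiv (hi - lo + 1) 2) 2 = 1 then PySem.Int.bxor res 1 else res

def solution_alt (start : Int) (length : Int) : Int :=
  if length ≤ 0 then 0
  else
    let res := pvXorRangeB start (start + length * length - length)
    (PySem.List.pyRange 1 (length - 1) 1).foldl
      (fun res r =>
        let lo := start + r * length + length - r
        PySem.Int.bxor res (pvXorRangeB lo (lo + r - 1)))
      res

-- ===== PRECONDITION & SPEC =====
def Spec_solution (start : Int) (length : Int) (out : Int) : Prop := out = solution_alt start length
instance (start : Int) (length : Int) (out : Int) : Decidable (Spec_solution start length out) := by unfold Spec_solution; infer_instance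

-- ===== CLAIM =====
def Claim_equal_solution : Prop := ∀ (start : Int) (length : Int), Dom_solution start length → Spec_solution start length (solution start length)

-- ===== LEMMAS AND PROOFS =====

-- encode an Int as (sign, magnitude) so that bxor becomes componentwise xor
def pvDec (p : Bool × Nat) : Int := if p.1 then -(p.2 : Int) - 1 else (p.2 : Int)
def pvEnc (a : Int) : Bool × Nat := if 0 ≤ a then (false, a.toNat) else (true, (-a - 1).toNat)

theorem pvBxor_enc (a b : Int) :
    PySem.Int.bxor a b = pvDec ((pvEnc a).1.xor (pvEnc b).1, (pvEnc a).2 ^^^ (pvEnc b).2) := by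
  unfold PySem.Int.bxor pvEnc
  split_ifs with h1 h2 h2 <;> simp [pvDec]

theorem pvEnc_dec (p : Bool × Nat) : pvEnc (pvDec p) = p := by
  obtain ⟨b, n⟩ := p
  cases b <;> (simp [pvDec, pvEnc]; try omega)

theorem pv_bxor_assoc (a b c : Int) :
    PySem.Int.bxor (PySem.Int.bxor a b) c = PySem.Int.bxor a (PySem.Int.bxor b c) := by
  rw [pvBxor_enc a b, pvBxor_enc b c, pvBxor_enc _ c, pvBxor_enc a]
  rw [pvEnc_dec, pvEnc_dec]
  simp [Nat.xor_assoc]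

theorem pv_zero_bxor (a : Int) : PySem.Int.bxor 0 a = a := by
  rw [PySem.Int.bxor_comm, PySem.Int.bxor_zero]

theorem pv_bxor_left_comm (a b c : Int) :
    PySem.Int.bxor a (PySem.Int.bxor b c) = PySem.Int.bxor b (PySem.Int.bxor a c) := by
  rw [← pv_bxor_assoc, ← pv_bxor_assoc, PySem.Int.bxor_comm a b]

theorem pv_nat_even_xor_one (m : Nat) : 2 * m ^^^ 1 = 2 * m + 1 := by
  apply Nat.eq_of_testBit_eq
  intro i
  cases i with
  | zero => simp [Nat.testBit_zero, Nat.mul_comm]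
  | succ j => simp [Nat.testBit_add_one, Nat.mul_comm]

theorem pv_nat_odd_xor_one (m : Nat) : (2 * m + 1) ^^^ 1 = 2 * m := by
  rw [← pv_nat_even_xor_one, Nat.xor_assoc, Nat.xor_self, Nat.xor_zero]

theorem pv_bxor_even_one (k : Int) : PySem.Int.bxor (2 * k) 1 = 2 * k + 1 := by
  rw [pvBxor_enc]
  unfold pvEnc
  by_cases h : 0 ≤ k
  · rw [if_pos (by omega : (0:Int) ≤ 2 * k), if_pos (by norm_num : (0:Int) ≤ 1)]
    simp only [pvDec, Bool.xor_false]
    have h2 : (2 * k).toNat = 2 * k.toNat := by omega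
    simp [h2, pv_nat_even_xor_one]
    omega
  · rw [if_neg (by omega : ¬ (0:Int) ≤ 2 * k), if_pos (by norm_num : (0:Int) ≤ 1)]
    simp only [pvDec, Bool.true_xor]
    have h2 : (-(2 * k) - 1).toNat = 2 * (-k - 1).toNat + 1 := by omega
    simp [h2, pv_nat_odd_xor_one]
    omega

theorem pv_bxor_pair (k : Int) : PySem.Int.bxor (2 * k) (2 * k + 1) = 1 := by
  rw [← pv_bxor_even_one k, ← pv_bxor_assoc, PySem.Int.bxor_self, pv_zero_bxor]

theorem pv_bxor_one_one (a : Int) : PySem.Int.bxor (PySem.Int.bxor a 1) 1 = a := by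
  rw [pv_bxor_assoc, PySem.Int.bxor_self, PySem.Int.bxor_zero]

-- the %4 table is a prefix XOR: pvXorA (m-1) ^ m = pvXorA m, for ALL ints
theorem pvXorA_step (m : Int) : PySem.Int.bxor (pvXorA (m - 1)) m = pvXorA m := by
  have hmod : ∀ x : Int, PySem.Int.mod x 4 = x % 4 := by
    intro x; unfold PySem.Int.mod; rw [Int.fmod_eq_emod]; simp
  have h0 : 0 ≤ m % 4 := Int.emod_nonneg m (by norm_num)
  have h4 : m % 4 < 4 := Int.emod_lt_of_pos m (by norm_num)
  have hdk : m = 4 * (m / 4) + m % 4 := by omega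
  set k := m / 4 with hk
  interval_cases h : (m % 4)
  · have h1 : (m - 1) % 4 = 3 := by omega
    simp [pvXorA, hmod, h, h1, PySem.Int.bxor_comm, PySem.Int.bxor_zero]
  · have h1 : (m - 1) % 4 = 0 := by omega
    simp only [pvXorA, hmod, h, h1]
    norm_num
    have hm : m = 2 * (2 * k) + 1 := by omega
    have hm1 : m - 1 = 2 * (2 * k) := by omega
    rw [hm1, hm, ← pv_bxor_even_one (2 * k), ← pv_bxor_assoc, PySem.Int.bxor_self]
    rw [PySem.Int.bxor_comm, PySem.Int.bxor_zero]
  · have h1 : (m - 1) % 4 = 1 := by omega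
    simp only [pvXorA, hmod, h, h1]
    norm_num
    have hm : m = 2 * (2 * k + 1) := by omega
    rw [hm, PySem.Int.bxor_comm, pv_bxor_even_one]
  · have h1 : (m - 1) % 4 = 2 := by omega
    simp [pvXorA, hmod, h, h1, PySem.Int.bxor_self]

-- fold of xor over range(a, a+n) equals A's closed form rXor(a, a+n-1)
theorem pv_fold_range_xor (n : Nat) : ∀ (a acc : Int),
    (PySem.List.pyRange a (a + n) 1).foldl (fun x k => PySem.Int.bxor x k) acc
      = PySem.Int.bxor acc (PySem.Int.bxor (pvXorA (a + n - 1)) (pvXorA (a - 1))) := by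
  induction n with
  | zero =>
      intro a acc
      rw [show a + ((0 : Nat) : Int) = a by simp, PySem.List.pyRange_one_eq_nil (le_refl a)]
      simp [PySem.Int.bxor_self, PySem.Int.bxor_zero]
  | succ n ih =>
      intro a acc
      rw [show ((n + 1 : Nat) : Int) = (n : Int) + 1 by push_cast; ring,
        show a + ((n : Int) + 1) = (a + n) + 1 by ring,
        PySem.List.pyRange_one_succ_right (by omega), List.foldl_append]
      simp only [List.foldl]
      rw [ih a acc]
      have hstep := pvXorA_step (a + n)
      rw [show a + (n : Int) + 1 - 1 = a + (n : Int) by ring, ← hstep]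
      rw [pv_bxor_assoc acc (PySem.Int.bxor (pvXorA (a + ↑n - 1)) (pvXorA (a - 1))) (a + ↑n)]
      congr 1
      rw [pv_bxor_assoc (pvXorA (a + ↑n - 1)) (pvXorA (a - 1)) (a + ↑n),
        pv_bxor_assoc (pvXorA (a + ↑n - 1)) (a + ↑n) (pvXorA (a - 1))]
      congr 1
      exact PySem.Int.bxor_comm _ _

-- fold of xor over a run of p whole pairs starting at an even number
theorem pv_fold_pairs (p : Nat) : ∀ (s acc : Int),
    (PySem.List.pyRange (2 * s) (2 * s + 2 * p) 1).foldl (fun x k => PySem.Int.bxor x k) acc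
      = if p % 2 = 1 then PySem.Int.bxor acc 1 else acc := by
  induction p with
  | zero =>
      intro s acc
      rw [show 2 * s + 2 * ((0 : Nat) : Int) = 2 * s by simp,
        PySem.List.pyRange_one_eq_nil (le_refl _)]
      simp
  | succ p ih =>
      intro s acc
      rw [show 2 * s + 2 * ((p + 1 : Nat) : Int) = (2 * s + 2 * p + 1) + 1 by push_cast; ring,
        PySem.List.pyRange_one_succ_right (by omega),
        show 2 * s + 2 * (p : Int) + 1 = (2 * s + 2 * p) + 1 by ring,
        PySem.List.pyRange_one_succ_right (by omega), List.foldl_append, List.foldl_append]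
      simp only [List.foldl]
      rw [ih s acc]
      rw [pv_bxor_assoc, show 2 * s + 2 * (p : Int) = 2 * (s + p) by ring, pv_bxor_pair]
      by_cases hp : p % 2 = 1
      · rw [if_pos hp, if_neg (by omega), pv_bxor_one_one]
      · rw [if_neg hp, if_pos (by omega)]

-- B's pairing computation equals the fold of xor over [lo, hi]
theorem pv_pairing (lo hi : Int) (h : lo ≤ hi) :
    pvXorRangeB lo hi
      = (PySem.List.pyRange lo (hi + 1) 1).foldl (fun x k => PySem.Int.bxor x k) 0 := by
  have hmod : ∀ x : Int, PySem.Int.mod x 2 = x % 2 := by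
    intro x; unfold PySem.Int.mod; rw [Int.fmod_eq_emod]; simp
  have hfd : ∀ q : Int, PySem.Int.floordiv (2 * q) 2 = q := by
    intro q; exact Int.mul_fdiv_cancel_left _ (by norm_num)
  have hpc : ∀ p : Nat, PySem.Int.mod (p : Int) 2 = 1 ↔ p % 2 = 1 := by
    intro p; rw [hmod]; omega
  unfold pvXorRangeB
  dsimp only
  by_cases hlo : lo % 2 = 1 <;> by_cases hhi : hi % 2 = 0
  · -- lo odd, hi even: peel both ends
    have t1 : PySem.Int.mod lo 2 = 1 := by rw [hmod]; exact hlo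
    have t2 : PySem.Int.mod hi 2 = 0 := by rw [hmod]; exact hhi
    rw [if_pos t1]
    dsimp only
    rw [if_pos t2]
    dsimp only
    obtain ⟨p, hp⟩ : ∃ p : Nat, hi - 1 - (lo + 1) + 1 = 2 * (p : Int) :=
      ⟨((hi - 1 - (lo + 1) + 1) / 2).toNat, by omega⟩
    obtain ⟨a, ha⟩ : ∃ a : Int, lo + 1 = 2 * a := ⟨(lo + 1) / 2, by omega⟩
    rw [hp, hfd, PySem.List.pyRange_one_cons (by omega)]
    simp only [List.foldl]
    rw [show hi + 1 = ((lo + 1) + 2 * (p : Int)) + 1 by omega,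
      PySem.List.pyRange_one_succ_right (by omega), List.foldl_append]
    simp only [List.foldl]
    rw [ha, pv_fold_pairs p a (PySem.Int.bxor 0 lo)]
    by_cases hp2 : p % 2 = 1
    · rw [if_pos ((hpc p).mpr hp2), if_pos hp2,
        show 2 * a + 2 * (p : Int) = hi by omega]
      simp [pv_bxor_assoc, pv_bxor_left_comm, PySem.Int.bxor_comm, pv_zero_bxor]
    · rw [if_neg (fun hc => hp2 ((hpc p).mp hc)), if_neg hp2,
        show 2 * a + 2 * (p : Int) = hi by omega]
  · -- lo odd, hi odd: peel lo only
    have t1 : PySem.Int.mod lo 2 = 1 := by rw [hmod]; exact hlo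
    have t2 : ¬ PySem.Int.mod hi 2 = 0 := by rw [hmod]; exact hhi
    rw [if_pos t1]
    dsimp only
    rw [if_neg t2]
    dsimp only
    obtain ⟨p, hp⟩ : ∃ p : Nat, hi - (lo + 1) + 1 = 2 * (p : Int) :=
      ⟨((hi - (lo + 1) + 1) / 2).toNat, by omega⟩
    obtain ⟨a, ha⟩ : ∃ a : Int, lo + 1 = 2 * a := ⟨(lo + 1) / 2, by omega⟩
    rw [hp, hfd, PySem.List.pyRange_one_cons (by omega)]
    simp only [List.foldl]
    rw [show hi + 1 = (lo + 1) + 2 * (p : Int) by omega, ha,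
      pv_fold_pairs p a (PySem.Int.bxor 0 lo)]
    by_cases hp2 : p % 2 = 1
    · rw [if_pos ((hpc p).mpr hp2), if_pos hp2]
    · rw [if_neg (fun hc => hp2 ((hpc p).mp hc)), if_neg hp2]
  · -- lo even, hi even: peel hi only
    have t1 : ¬ PySem.Int.mod lo 2 = 1 := by rw [hmod]; exact hlo
    have t2 : PySem.Int.mod hi 2 = 0 := by rw [hmod]; exact hhi
    rw [if_neg t1]
    dsimp only
    rw [if_pos t2]
    dsimp only
    obtain ⟨p, hp⟩ : ∃ p : Nat, hi - 1 - lo + 1 = 2 * (p : Int) :=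
      ⟨((hi - 1 - lo + 1) / 2).toNat, by omega⟩
    obtain ⟨a, ha⟩ : ∃ a : Int, lo = 2 * a := ⟨lo / 2, by omega⟩
    rw [hp, hfd,
      show hi + 1 = (lo + 2 * (p : Int)) + 1 by omega,
      PySem.List.pyRange_one_succ_right (by omega), List.foldl_append]
    simp only [List.foldl]
    rw [ha, pv_fold_pairs p a 0]
    by_cases hp2 : p % 2 = 1
    · rw [if_pos ((hpc p).mpr hp2), if_pos hp2,
        show 2 * a + 2 * (p : Int) = hi by omega]
      simp [pv_bxor_assoc, pv_bxor_left_comm, PySem.Int.bxor_comm, pv_zero_bxor]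
    · rw [if_neg (fun hc => hp2 ((hpc p).mp hc)), if_neg hp2,
        show 2 * a + 2 * (p : Int) = hi by omega]
  · -- lo even, hi odd: whole pairs only
    have t1 : ¬ PySem.Int.mod lo 2 = 1 := by rw [hmod]; exact hlo
    have t2 : ¬ PySem.Int.mod hi 2 = 0 := by rw [hmod]; exact hhi
    rw [if_neg t1]
    dsimp only
    rw [if_neg t2]
    dsimp only
    obtain ⟨p, hp⟩ : ∃ p : Nat, hi - lo + 1 = 2 * (p : Int) :=
      ⟨((hi - lo + 1) / 2).toNat, by omega⟩
    obtain ⟨a, ha⟩ : ∃ a : Int, lo = 2 * a := ⟨lo / 2, by omega⟩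
    rw [hp, hfd, show hi + 1 = lo + 2 * (p : Int) by omega, ha,
      pv_fold_pairs p a 0]
    by_cases hp2 : p % 2 = 1
    · rw [if_pos ((hpc p).mpr hp2), if_pos hp2]
    · rw [if_neg (fun hc => hp2 ((hpc p).mp hc)), if_neg hp2]

-- the two per-range closed forms agree on every nonempty range
theorem pv_row (lo hi : Int) (h : lo ≤ hi) : pvXorRangeB lo hi = pvRXorA lo hi := by
  rw [pv_pairing lo hi h]
  obtain ⟨w, hw⟩ : ∃ w : Nat, hi + 1 = lo + (w : Int) := ⟨(hi + 1 - lo).toNat, by omega⟩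
  rw [hw, pv_fold_range_xor, pv_zero_bxor]
  unfold pvRXorA
  rw [show lo + (w : Int) - 1 = hi by omega]

-- the gap fold with A's closed form substituted for the pairing helper
def pvGapA (start L : Int) (acc g : Int) : Int :=
  PySem.Int.bxor acc (pvRXorA (start + g * L + L - g) (start + g * L + L - 1))

-- the 5-term AC shuffle used by the bridge's step
theorem pv_ac (res p q u v : Int) :
    PySem.Int.bxor (PySem.Int.bxor res (PySem.Int.bxor p q)) (PySem.Int.bxor u v)
      = PySem.Int.bxor (PySem.Int.bxor res (PySem.Int.bxor u q)) (PySem.Int.bxor v p) := by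
  rw [pv_bxor_assoc res (PySem.Int.bxor p q) (PySem.Int.bxor u v),
    pv_bxor_assoc res (PySem.Int.bxor u q) (PySem.Int.bxor v p)]
  congr 1
  rw [pv_bxor_assoc p q (PySem.Int.bxor u v), pv_bxor_assoc u q (PySem.Int.bxor v p)]
  rw [pv_bxor_left_comm q u v, pv_bxor_left_comm p u (PySem.Int.bxor q v),
    pv_bxor_left_comm p q v, PySem.Int.bxor_comm p v]

-- A's countdown fold from row r (1 ≤ r = L - n) equals the span-minus-remaining-gaps fold
theorem pv_bridge (start L : Int) : ∀ (n : Nat), 1 ≤ n → ∀ (r res : Int), r = L - n → 1 ≤ r →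
    ((PySem.List.pyRange (n : Int) 0 (-1)).foldl
      (fun (st : Int × Int × Int) i =>
        let temp := st.1
        let res := st.2.1
        let j := st.2.2
        let e := temp + i - 1
        let res := PySem.Int.bxor res (pvRXorA temp e)
        let j := j + 1
        (e + j, res, j))
      (start + r * L, res, r)).2.1
    = (PySem.List.pyRange r (L - 1) 1).foldl (pvGapA start L)
        (PySem.Int.bxor res (pvRXorA (start + r * L) (start + L * L - L))) := by
  intro n
  induction n with
  | zero => intro h; omega
  | succ n ih =>
      intro _ r res hr hr1
      rcases Nat.eq_zero_or_pos n with hn | hn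
      · -- base: one row left, r = L - 1
        subst hn
        have hrL : r = L - 1 := by push_cast at hr; omega
        rw [show ((0 + 1 : Nat) : Int) = 1 by norm_num,
          PySem.List.pyRange_neg_one_cons (by norm_num), PySem.List.pyRange_neg_one_eq_nil (by norm_num)]
        simp only [List.foldl]
        rw [PySem.List.pyRange_one_eq_nil (by omega)]
        simp only [List.foldl]
        congr 2
        rw [hrL]; ring
      · -- step: peel the first remaining row and the gap just after it
        rw [show ((n + 1 : Nat) : Int) = (n : Int) + 1 by push_cast; ring,
          PySem.List.pyRange_neg_one_cons (by positivity)]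
        simp only [List.foldl]
        have hL' : L = r + (n : Int) + 1 := by push_cast at hr; omega
        have htemp : start + r * L + ((n : Int) + 1) - 1 + (r + 1) = start + (r + 1) * L := by
          rw [hL']; ring
        rw [show (n : Int) + 1 - 1 = (n : Int) by ring, htemp]
        rw [ih hn (r + 1)
          (PySem.Int.bxor res (pvRXorA (start + r * L) (start + r * L + ((n : Int) + 1) - 1)))
          (by push_cast at hr ⊢; omega) (by omega)]
        rw [PySem.List.pyRange_one_cons (show r < L - 1 by omega)]
        simp only [List.foldl]
        congr 1
        unfold pvGapA pvRXorA
        rw [show start + r * L + ((n : Int) + 1) - 1 = start + r * L + L - r - 1 by rw [hL']; ring,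
          show start + (r + 1) * L - 1 = start + r * L + L - 1 by ring]
        exact pv_ac res (pvXorA (start + r * L + L - r - 1)) (pvXorA (start + r * L - 1))
          (pvXorA (start + L * L - L)) (pvXorA (start + r * L + L - 1))

-- ===== VERDICT =====
theorem solution_spec : Claim_equal_solution := by
  intro start L _
  unfold Spec_solution solution solution_alt
  by_cases hL : L ≤ 0
  · rw [PySem.List.pyRange_neg_one_eq_nil hL, if_pos hL]
    rfl
  · rw [if_neg hL]
    push_neg at hL
    -- convert B's pairing-helper fold to the pvRXorA fold
    have hconv :
        (PySem.List.pyRange 1 (L - 1) 1).foldl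
          (fun res r =>
            let lo := start + r * L + L - r
            PySem.Int.bxor res (pvXorRangeB lo (lo + r - 1)))
          (pvXorRangeB start (start + L * L - L))
        = (PySem.List.pyRange 1 (L - 1) 1).foldl (pvGapA start L)
            (pvRXorA start (start + L * L - L)) := by
      have hfull : pvXorRangeB start (start + L * L - L) = pvRXorA start (start + L * L - L) := by
        apply pv_row
        nlinarith [mul_nonneg (by omega : (0:Int) ≤ L) (by omega : (0:Int) ≤ L - 1)]
      rw [hfull]
      apply PySem.List.foldl_congr_mem
      intro acc g hg
      have h1g : 1 ≤ g := ((PySem.List.mem_pyRange_one).mp hg).1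
      simp only [pvGapA]
      rw [pv_row _ _ (by omega),
        show start + g * L + L - g + g - 1 = start + g * L + L - 1 by ring]
    rw [hconv]
    by_cases h1 : L = 1
    · subst h1
      rw [PySem.List.pyRange_neg_one_cons (by norm_num),
        PySem.List.pyRange_neg_one_eq_nil (by norm_num),
        PySem.List.pyRange_one_eq_nil (by norm_num)]
      simp only [List.foldl]
      rw [pv_zero_bxor]
      norm_num
    · -- L ≥ 2: peel A's first row (its leading gap is empty), then the bridge
      have hL2 : 2 ≤ L := by omega
      rw [PySem.List.pyRange_neg_one_cons (by omega)]
      simp only [List.foldl]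
      rw [show start + L - 1 + (0 + 1) = start + 1 * L by ring, show (0:Int) + 1 = 1 by norm_num]
      have hcast : (((L - 1).toNat : Nat) : Int) = L - 1 := by omega
      have hb := pv_bridge start L (L - 1).toNat (by omega) 1
        (PySem.Int.bxor 0 (pvRXorA start (start + L - 1))) (by omega) (by norm_num)
      rw [hcast] at hb
      rw [hb]
      congr 1
      -- acc algebra: rXor(start, row0end) ^ rXor(start+L, E) = rXor(start, E)
      rw [pv_zero_bxor]
      unfold pvRXorA
      rw [show start + 1 * L - 1 = start + L - 1 by ring]
      rw [pv_bxor_assoc (pvXorA (start + L - 1)) (pvXorA (start - 1))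
          (PySem.Int.bxor (pvXorA (start + L * L - L)) (pvXorA (start + L - 1))),
        pv_bxor_left_comm (pvXorA (start - 1)) (pvXorA (start + L * L - L))
          (pvXorA (start + L - 1)),
        pv_bxor_left_comm (pvXorA (start + L - 1)) (pvXorA (start + L * L - L))
          (PySem.Int.bxor (pvXorA (start - 1)) (pvXorA (start + L - 1))),
        pv_bxor_left_comm (pvXorA (start + L - 1)) (pvXorA (start - 1))
          (pvXorA (start + L - 1)),
        PySem.Int.bxor_self, PySem.Int.bxor_zero]
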